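-- pv_equiv track=rewrite | github.com/MochAndimas/network_monitoring | backend/app/repositories/metric_repository.py | _rollup_statuses
-- ===== SOURCE A (Python) =====
-- def _rollup_statuses(statuses: list[str]) -> str:
--     """Handle the internal rollup statuses helper logic for database query and persistence repositories.
--
--     Args:
--         statuses: statuses value used by this routine (type `list[str]`).
--
--     Returns:
--         `str` result produced by the routine.
--     """
--     normalized = [str(status).lower() for status in statuses if status]
--     if not normalized:
--         return "unknown"
--     if any(status in {"down", "critical", "error"} for status in normalized):
--         return "down"
--     if any(status in {"warning", "degraded", "unavailable"} for status in normalized):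
--         return "warning"
--     if all(status in {"up", "healthy", "ok"} for status in normalized):
--         return "up"
--     return normalized[0]
-- ===== SOURCE B (Python) =====
-- def _rollup_statuses(statuses: list[str]) -> str:
--     """Single-pass rollup: one loop maintaining severity flags and the first kept element."""
--     saw_down = False
--     saw_warning = False
--     all_up = True
--     first = None
--     for status in statuses:
--         if not status:
--             continue
--         norm = str(status).lower()
--         if first is None:
--             first = norm
--         if norm in ("down", "critical", "error"):
--             saw_down = True
--         if norm in ("warning", "degraded", "unavailable"):
--             saw_warning = True
--         if norm not in ("up", "healthy", "ok"):
--             all_up = False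
--     if first is None:
--         return "unknown"
--     if saw_down:
--         return "down"
--     if saw_warning:
--         return "warning"
--     if all_up:
--         return "up"
--     return first
-- ===== Notes on version B (the rewrite author's own statement) =====
-- stated objective: alternative
-- what changed: Replaced the build-a-list-then-scan-it-up-to-three-times structure (list comprehension + any/any/all passes + indexing) with a single loop over the input maintaining saw_down/saw_warning/all_up flags and the first kept element.
import Mathlib
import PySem

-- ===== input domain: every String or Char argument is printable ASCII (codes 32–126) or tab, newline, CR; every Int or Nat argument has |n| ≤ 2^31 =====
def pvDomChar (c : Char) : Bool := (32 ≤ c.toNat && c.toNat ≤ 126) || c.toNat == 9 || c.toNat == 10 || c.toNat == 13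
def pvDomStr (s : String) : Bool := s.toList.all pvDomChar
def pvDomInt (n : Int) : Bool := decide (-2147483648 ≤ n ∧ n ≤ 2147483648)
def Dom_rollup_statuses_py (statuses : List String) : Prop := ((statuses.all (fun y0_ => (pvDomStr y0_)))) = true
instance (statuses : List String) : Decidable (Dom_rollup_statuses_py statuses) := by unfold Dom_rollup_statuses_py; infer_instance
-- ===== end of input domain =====

-- B replaces A's list-comprehension-plus-three-scans structure by a single loop with
-- severity flags and the first kept element (alternative decomposition, same cost).

-- ===== PORT A =====
def rollup_statuses_py (statuses : List String) : String :=
  let normalized := (statuses.filter (fun s => !(s == ""))).map PySem.Str.lower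
  if normalized = [] then "unknown"
  else if normalized.any (fun s => s == "down" || s == "critical" || s == "error") then "down"
  else if normalized.any (fun s => s == "warning" || s == "degraded" || s == "unavailable") then "warning"
  else if normalized.all (fun s => s == "up" || s == "healthy" || s == "ok") then "up"
  else normalized.headD ""   -- normalized[0]; this branch is only reached with normalized ≠ []

-- ===== PORT B =====
def rollupStep (st : Bool × Bool × Bool × Option String) (status : String) :
    Bool × Bool × Bool × Option String :=
  if status == "" then st
  else
    let norm := PySem.Str.lower status
    let first := match st.2.2.2 with | none => some norm | some f => some f
    ( st.1 || (norm == "down" || norm == "critical" || norm == "error"),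
      st.2.1 || (norm == "warning" || norm == "degraded" || norm == "unavailable"),
      st.2.2.1 && (norm == "up" || norm == "healthy" || norm == "ok"),
      first )

def rollup_statuses_py_alt (statuses : List String) : String :=
  let st := statuses.foldl rollupStep (false, false, true, none)
  match st.2.2.2 with
  | none => "unknown"
  | some first =>
    if st.1 then "down"
    else if st.2.1 then "warning"
    else if st.2.2.1 then "up"
    else first

-- ===== PRECONDITION & SPEC =====
def Spec_rollup_statuses_py (statuses : List String) (out : String) : Prop := out = rollup_statuses_py_alt statuses
instance (statuses : List String) (out : String) : Decidable (Spec_rollup_statuses_py statuses out) := by unfold Spec_rollup_statuses_py; infer_instance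

-- ===== CLAIM (what is proved, stated in full; the proofs are below) =====
def Claim_equal_rollup_statuses_py : Prop := ∀ (statuses : List String), Dom_rollup_statuses_py statuses → Spec_rollup_statuses_py statuses (rollup_statuses_py statuses)

-- ===== LEMMAS AND PROOFS =====

-- the fold's state is determined by the normalized list: flags are the three scans, first is head?
lemma rollup_fold_inv (xs : List String) (d w u : Bool) (f : Option String) :
    xs.foldl rollupStep (d, w, u, f) =
      (let n := (xs.filter (fun s => !(s == ""))).map PySem.Str.lower
       ( d || n.any (fun s => s == "down" || s == "critical" || s == "error"),
         w || n.any (fun s => s == "warning" || s == "degraded" || s == "unavailable"),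
         u && n.all (fun s => s == "up" || s == "healthy" || s == "ok"),
         match f with | none => n.head? | some x => some x )) := by
  induction xs generalizing d w u f with
  | nil => cases f <;> simp
  | cons a t ih =>
    by_cases ha : a == ""
    · simp [rollupStep, ha, ih]
    · cases f with
      | none => simp [rollupStep, ha, ih, Bool.or_assoc, Bool.and_assoc]
      | some x => simp [rollupStep, ha, ih, Bool.or_assoc, Bool.and_assoc]

-- ===== VERDICT (by name: the statement is the Claim_ definition above) =====
theorem rollup_statuses_py_spec : Claim_equal_rollup_statuses_py := by
  intro statuses _
  unfold Spec_rollup_statuses_py rollup_statuses_py rollup_statuses_py_alt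
  rw [rollup_fold_inv]
  cases hn : (statuses.filter (fun s => !(s == ""))).map PySem.Str.lower with
  | nil => simp
  | cons a t => simp
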